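-- pv_equiv track=rewrite | github.com/Minsang0130/Coding-Problems | Programmers/코딩기초트레이닝/조건에 맞게 수열 변환하기2.py | solution
-- ===== SOURCE A (Python) =====
-- def solution(arr):
--     count = 0
--     while True:
--         # temp_list를 새로 초기화
--         temp_list = []
--         for i in range(len(arr)):
--             if arr[i] >= 50 and arr[i] % 2 == 0:
--                 temp_list.append(arr[i] // 2)
--             elif arr[i] < 50 and arr[i] % 2 != 0:
--                 temp_list.append(arr[i] * 2 + 1)
--             else:
--                 temp_list.append(arr[i])
--
--         # arr와 temp_list가 동일한지 체크
--         if arr == temp_list: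
--             return count
--         else:
--             arr = temp_list[:]  # temp_list의 값을 arr에 복사
--             count += 1
-- ===== SOURCE B (Python) =====
-- def solution(arr):
--     # per-element steps to fixpoint: halve while >=50 and even, then a closed-form
--     # doubling count via bit_length (for nonnegative odds below 50); answer is the max
--     best = 0
--     for x in arr:
--         h = 0
--         while x >= 50 and x % 2 == 0:
--             x //= 2
--             h += 1
--         if x % 2 != 0 and 0 <= x < 50:
--             h += (50 // (x + 1)).bit_length()
--         best = max(best, h)
--     return best
-- ===== Notes on version B (the rewrite author's own statement) =====
-- stated objective: alternative
-- what changed: Instead of repeatedly rebuilding and comparing the whole array until it stabilises, B makes one pass: for each element it halves while >=50 and even, adds a closed-form doubling count via bit_length for nonnegative odds below 50, and returns the maximum; Pre_ excludes arrays with an odd element below -1, on which A's loop never terminates.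
import Mathlib
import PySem

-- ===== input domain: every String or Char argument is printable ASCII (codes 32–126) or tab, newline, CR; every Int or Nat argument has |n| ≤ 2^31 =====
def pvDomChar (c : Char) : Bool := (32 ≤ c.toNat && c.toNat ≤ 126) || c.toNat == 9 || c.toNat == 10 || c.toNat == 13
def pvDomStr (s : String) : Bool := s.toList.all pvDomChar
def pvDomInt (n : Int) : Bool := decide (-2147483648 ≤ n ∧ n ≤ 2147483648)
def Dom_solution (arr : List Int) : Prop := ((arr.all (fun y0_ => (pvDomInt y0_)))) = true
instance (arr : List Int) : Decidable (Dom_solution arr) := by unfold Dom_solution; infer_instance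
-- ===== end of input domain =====

-- B replaces A's repeated whole-array rebuild-and-compare passes by a per-element pass:
-- halve while >=50 and even, then a closed-form doubling count via bit_length; answer = max.


-- ===== PORT A =====
-- the per-element transformation A applies inside its for-loop (exact Python // and % via PySem)
def stepE (x : Int) : Int :=
  if x ≥ 50 ∧ PySem.Int.mod x 2 = 0 then PySem.Int.floordiv x 2
  else if x < 50 ∧ PySem.Int.mod x 2 ≠ 0 then x * 2 + 1
  else x

-- A's while-True loop: rebuild the whole array, compare, repeat.  The fuel argument only
-- makes the recursion total; on Pre_ inputs the loop stabilises well within 64 steps.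
def loopA (arr : List Int) (count : Int) : Nat → Int
  | 0 => count
  | fuel + 1 =>
    let temp := arr.map stepE
    if arr = temp then count else loopA temp (count + 1) fuel

def solution (arr : List Int) : Int := loopA arr 0 64

-- ===== PORT B =====
-- Source B's inner while: halve x (counting in h) while x >= 50 and even; terminates since |x| shrinks
def halveLoop (x : Int) (h : Int) : Int × Int :=
  if hc : 50 ≤ x ∧ PySem.Int.mod x 2 = 0 then
    halveLoop (PySem.Int.floordiv x 2) (h + 1)
  else (x, h)
termination_by x.natAbs
decreasing_by
  rw [PySem.Int.floordiv_eq_ediv_of_pos (by omega)]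
  omega

def solution_alt (arr : List Int) : Int :=
  arr.foldl (fun best x =>
    let p := halveLoop x 0
    let h : Int :=
      if PySem.Int.mod p.1 2 ≠ 0 ∧ 0 ≤ p.1 ∧ p.1 < 50 then
        p.2 + (PySem.Int.bitLength (PySem.Int.floordiv 50 (p.1 + 1)) : Int)
      else p.2
    max best h) 0

-- ===== PRECONDITION & SPEC =====
-- Pre_ excludes arrays containing an odd element below -1: on those A's while-loop never
-- terminates (that element keeps strictly decreasing under x ↦ 2*x+1), so A returns on no such input.
def Pre_solution (arr : List Int) : Prop := ∀ x ∈ arr, -1 ≤ x ∨ PySem.Int.mod x 2 = 0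
instance (arr : List Int) : Decidable (Pre_solution arr) := by unfold Pre_solution; infer_instance

def pvWitness_solution : List Int := [49, 100, -2]

def Spec_solution (arr : List Int) (out : Int) : Prop := out = solution_alt arr
instance (arr : List Int) (out : Int) : Decidable (Spec_solution arr out) := by unfold Spec_solution; infer_instance

-- ===== CLAIM (what is proved, stated in full; the proofs are below) =====
def Claim_equal_solution : Prop := ∀ (arr : List Int), Dom_solution arr → Pre_solution arr → Spec_solution arr (solution arr)

-- ===== LEMMAS AND PROOFS =====

-- proof-only device: the per-element step counter with fuel, used to factor A's global loop
def stepsB (x : Int) (c : Int) : Nat → Int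
  | 0 => c
  | fuel + 1 =>
    let y := stepE x
    if y = x then c else stepsB y (c + 1) fuel

-- proof-only: B's per-element value, named so the fold can be reasoned about
def pe (x : Int) : Int :=
  if PySem.Int.mod (halveLoop x 0).1 2 ≠ 0 ∧ 0 ≤ (halveLoop x 0).1 ∧ (halveLoop x 0).1 < 50 then
    (halveLoop x 0).2 + (PySem.Int.bitLength (PySem.Int.floordiv 50 ((halveLoop x 0).1 + 1)) : Int)
  else (halveLoop x 0).2

def fmax (f : Int → Int) (l : List Int) : Int := l.foldl (fun m x => max m (f x)) 0

lemma alt_eq_fmax (arr : List Int) : solution_alt arr = fmax pe arr := rfl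

lemma foldl_max_start (f : Int → Int) : ∀ (l : List Int) (a b : Int),
    l.foldl (fun m x => max m (f x)) (max a b) = max a (l.foldl (fun m x => max m (f x)) b) := by
  intro l
  induction l with
  | nil => intro a b; simp
  | cons x t ih =>
    intro a b
    simp only [List.foldl_cons, max_assoc]
    exact ih a (max b (f x))

lemma fmax_cons (f : Int → Int) (x : Int) (t : List Int) :
    fmax f (x :: t) = max (f x) (fmax f t) := by
  simp only [fmax, List.foldl_cons]
  rw [show max 0 (f x) = max (f x) 0 from max_comm _ _, foldl_max_start]

lemma fmax_nonneg (f : Int → Int) (l : List Int) : 0 ≤ fmax f l := by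
  induction l with
  | nil => simp [fmax]
  | cons x t ih => rw [fmax_cons]; exact le_trans ih (le_max_right _ _)

lemma fmax_all_zero (f : Int → Int) (l : List Int) (h : ∀ x ∈ l, f x = 0) :
    fmax f l = 0 := by
  induction l with
  | nil => rfl
  | cons x t ih =>
    rw [fmax_cons, h x (by simp), ih (fun y hy => h y (by simp [hy]))]
    simp

lemma fmax_congr (f g : Int → Int) (l : List Int) (h : ∀ x ∈ l, f x = g x) :
    fmax f l = fmax g l := by
  induction l with
  | nil => rfl
  | cons x t ih => rw [fmax_cons, fmax_cons, h x (by simp), ih (fun y hy => h y (by simp [hy]))]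

lemma stepsB_fixed (x : Int) (hx : stepE x = x) : ∀ (c : Int) (n : Nat), stepsB x c n = c := by
  intro c n
  cases n with
  | zero => rfl
  | succ m => simp [stepsB, hx]

lemma stepsB_unfixed (x : Int) (hx : stepE x ≠ x) (c : Int) (n : Nat) :
    stepsB x c (n + 1) = stepsB (stepE x) (c + 1) n := by
  simp [stepsB, hx]

lemma stepsB_shift : ∀ (n : Nat) (x : Int) (c : Int), stepsB x c n = c + stepsB x 0 n := by
  intro n
  induction n with
  | zero => intro x c; simp [stepsB]
  | succ m ih =>
    intro x c
    by_cases hx : stepE x = x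
    · rw [stepsB_fixed x hx, stepsB_fixed x hx]; ring
    · rw [stepsB_unfixed x hx, stepsB_unfixed x hx, ih (stepE x) (c + 1), ih (stepE x) (0+1)]
      ring

lemma stepsB_nonneg (n : Nat) (x : Int) : 0 ≤ stepsB x 0 n := by
  induction n generalizing x with
  | zero => simp [stepsB]
  | succ m ih =>
    by_cases hx : stepE x = x
    · rw [stepsB_fixed x hx]
    · rw [stepsB_unfixed x hx, stepsB_shift m (stepE x) (0+1)]
      have := ih (stepE x); omega

lemma stepsB_stable : ∀ (n m : Nat) (x : Int), n ≤ m → stepsB x 0 n < n →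
    stepsB x 0 m = stepsB x 0 n := by
  intro n
  induction n with
  | zero => intro m x _ h; simp [stepsB] at h
  | succ k ih =>
    intro m x hnm h
    obtain ⟨m', rfl⟩ : ∃ m', m = m' + 1 := ⟨m - 1, by omega⟩
    by_cases hx : stepE x = x
    · rw [stepsB_fixed x hx, stepsB_fixed x hx]
    · rw [stepsB_unfixed x hx 0 k, stepsB_shift k (stepE x) (0+1)] at h
      rw [stepsB_unfixed x hx 0 m', stepsB_unfixed x hx 0 k,
        stepsB_shift m' (stepE x) (0+1), stepsB_shift k (stepE x) (0+1),
        ih m' (stepE x) (by omega) (by push_cast at h ⊢; omega)]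

lemma loopA_shift : ∀ (n : Nat) (arr : List Int) (c : Int), loopA arr c n = c + loopA arr 0 n := by
  intro n
  induction n with
  | zero => intro arr c; simp [loopA]
  | succ m ih =>
    intro arr c
    by_cases h : arr = arr.map stepE
    · simp [loopA, ← h]
    · simp only [loopA, if_neg h]
      rw [ih (arr.map stepE) (c + 1), ih (arr.map stepE) (0+1)]
      ring

lemma map_self_iff (l : List Int) : l = l.map stepE ↔ ∀ x ∈ l, stepE x = x := by
  induction l with
  | nil => simp
  | cons x t ih =>
    simp only [List.map_cons, List.cons.injEq, List.mem_cons]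
    constructor
    · rintro ⟨hx, ht⟩ y (rfl | hy)
      · exact hx.symm
      · exact (ih.mp ht) y hy
    · intro h
      exact ⟨(h x (Or.inl rfl)).symm, ih.mpr (fun y hy => h y (Or.inr hy))⟩

-- key step: one global iteration shifts every per-element count by one (as a max)
lemma fmax_step (n : Nat) (l : List Int) (h : ∃ x ∈ l, stepE x ≠ x) :
    fmax (fun x => stepsB x 0 (n + 1)) l = 1 + fmax (fun x => stepsB (stepE x) 0 n) l := by
  induction l with
  | nil => obtain ⟨x, hx, _⟩ := h; simp at hx
  | cons x t ih =>
    rw [fmax_cons, fmax_cons]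
    by_cases hx : stepE x = x
    · have ht : ∃ y ∈ t, stepE y ≠ y := by
        obtain ⟨y, hy, hne⟩ := h
        rcases List.mem_cons.mp hy with rfl | hy'
        · exact absurd hx hne
        · exact ⟨y, hy', hne⟩
      rw [stepsB_fixed x hx, hx, stepsB_fixed x hx, ih ht]
      have h1 := fmax_nonneg (fun y => stepsB (stepE y) 0 n) t
      have h2 := fmax_nonneg (fun y => stepsB y 0 (n + 1)) t
      omega
    · have hhead : stepsB x 0 (n + 1) = 1 + stepsB (stepE x) 0 n := by
        rw [stepsB_unfixed x hx, stepsB_shift n (stepE x) (0+1)]; ring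
      by_cases ht : ∃ y ∈ t, stepE y ≠ y
      · rw [hhead, ih ht]; omega
      · push Not at ht
        have t1 : fmax (fun y => stepsB y 0 (n + 1)) t = 0 :=
          fmax_all_zero _ t (fun y hy => stepsB_fixed y (ht y hy) 0 (n + 1))
        have t2 : fmax (fun y => stepsB (stepE y) 0 n) t = 0 :=
          fmax_all_zero _ t (fun y hy => by rw [ht y hy]; exact stepsB_fixed y (ht y hy) 0 n)
        rw [t1, t2, hhead]
        have := stepsB_nonneg n (stepE x)
        omega

-- A's global loop with fuel n is the max of the per-element fueled counters
lemma main_lemma : ∀ (n : Nat) (arr : List Int),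
    loopA arr 0 n = fmax (fun x => stepsB x 0 n) arr := by
  intro n
  induction n with
  | zero =>
    intro arr
    simp only [loopA]
    exact (fmax_all_zero _ arr (fun x _ => rfl)).symm
  | succ m ih =>
    intro arr
    by_cases h : arr = arr.map stepE
    · simp only [loopA, if_pos h]
      exact (fmax_all_zero _ arr (fun x hx =>
        stepsB_fixed x ((map_self_iff arr).mp h x hx) 0 (m + 1))).symm
    · simp only [loopA, if_neg h]
      have hex : ∃ x ∈ arr, stepE x ≠ x := by
        by_contra hc
        push Not at hc
        exact h ((map_self_iff arr).mpr (fun x hx => hc x hx))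
      rw [loopA_shift m (arr.map stepE) (0+1), ih (arr.map stepE), fmax_step m arr hex]
      congr 1
      simp [fmax, List.foldl_map]

-- ---- now the B side: characterising halveLoop / pe ----

lemma halveLoop_pos {x : Int} (h : Int) (hc : 50 ≤ x ∧ PySem.Int.mod x 2 = 0) :
    halveLoop x h = halveLoop (PySem.Int.floordiv x 2) (h + 1) := by
  rw [halveLoop.eq_def, dif_pos hc]

lemma halveLoop_neg {x : Int} (h : Int) (hc : ¬(50 ≤ x ∧ PySem.Int.mod x 2 = 0)) :
    halveLoop x h = (x, h) := by
  rw [halveLoop.eq_def, dif_neg hc]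

lemma halve_shift : ∀ (n : Nat) (x h : Int), x.natAbs ≤ n →
    halveLoop x h = ((halveLoop x 0).1, (halveLoop x 0).2 + h) := by
  intro n
  induction n with
  | zero =>
    intro x h hb
    have hx : x = 0 := by omega
    subst hx
    rw [halveLoop_neg h (by decide), halveLoop_neg 0 (by decide)]
    simp
  | succ k ih =>
    intro x h hb
    by_cases hc : 50 ≤ x ∧ PySem.Int.mod x 2 = 0
    · have hd : (PySem.Int.floordiv x 2).natAbs ≤ k := by
        rw [PySem.Int.floordiv_eq_ediv_of_pos (by omega)]
        omega
      rw [halveLoop_pos h hc, halveLoop_pos 0 hc, ih _ (h + 1) hd, ih _ (0 + 1) hd]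
      simp only [Prod.mk.injEq]
      exact ⟨trivial, by ring⟩
    · rw [halveLoop_neg h hc, halveLoop_neg 0 hc]
      simp

lemma pe_halve {x : Int} (h1 : 50 ≤ x) (h2 : PySem.Int.mod x 2 = 0) :
    pe x = 1 + pe (PySem.Int.floordiv x 2) := by
  unfold pe
  rw [halveLoop_pos 0 ⟨h1, h2⟩,
    halve_shift (PySem.Int.floordiv x 2).natAbs _ (0 + 1) le_rfl]
  dsimp only
  split_ifs <;> ring

lemma pe_nohalve {x : Int} (hc : ¬(50 ≤ x ∧ PySem.Int.mod x 2 = 0)) :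
    pe x = if PySem.Int.mod x 2 ≠ 0 ∧ 0 ≤ x ∧ x < 50 then
      (PySem.Int.bitLength (PySem.Int.floordiv 50 (x + 1)) : Int) else 0 := by
  unfold pe
  rw [halveLoop_neg 0 hc]
  dsimp only
  split_ifs <;> simp

-- on [0,50) the fueled counter stabilises by fuel 7 and agrees with pe (finite check)
lemma small : ∀ y : Int, 0 ≤ y → y < 50 → stepsB y 0 7 < 7 ∧ stepsB y 0 7 = pe y := by
  intro y h0 h1
  interval_cases y <;>
    exact ⟨by decide, by rw [pe_nohalve (by decide)]; decide⟩

lemma bridge_main : ∀ (f : Nat) (x : Int), 0 ≤ x → x ≤ 25 * 2 ^ f →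
    stepsB x 0 (f + 7) = pe x := by
  intro f
  induction f with
  | zero =>
    intro x h0 h1
    norm_num at h1
    exact (small x h0 (by omega)).2
  | succ k ih =>
    intro x h0 h1
    by_cases hc : 50 ≤ x ∧ PySem.Int.mod x 2 = 0
    · have hdiv : PySem.Int.floordiv x 2 = x / 2 :=
        PySem.Int.floordiv_eq_ediv_of_pos (by omega)
      have hE : stepE x = PySem.Int.floordiv x 2 := by
        unfold stepE; rw [if_pos hc]
      have hne : stepE x ≠ x := by rw [hE, hdiv]; omega
      have hstep : stepsB x 0 (k + 1 + 7) = 1 + stepsB (stepE x) 0 (k + 7) := by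
        rw [show k + 1 + 7 = (k + 7) + 1 by omega, stepsB_unfixed x hne,
          stepsB_shift (k + 7) (stepE x) (0 + 1)]
        ring
      rw [pow_succ] at h1
      rw [hstep, hE, hdiv, ih (x / 2) (by omega) (by omega), ← hdiv,
        ← pe_halve hc.1 hc.2]
    · by_cases h50 : x < 50
      · have hs := small x h0 h50
        rw [stepsB_stable 7 (k + 1 + 7) x (by omega) hs.1]
        exact hs.2
      · have hm : PySem.Int.mod x 2 ≠ 0 := fun h => hc ⟨by omega, h⟩
        have hfix : stepE x = x := by
          unfold stepE
          rw [if_neg (fun h => hm h.2), if_neg (fun h => h50 h.1)]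
        rw [stepsB_fixed x hfix, pe_nohalve hc, if_neg (fun h => h50 h.2.2)]

lemma elem_eq (x : Int) (hd : pvDomInt x = true) (hp : -1 ≤ x ∨ PySem.Int.mod x 2 = 0) :
    stepsB x 0 64 = pe x := by
  have hb : -2147483648 ≤ x ∧ x ≤ 2147483648 := by simpa [pvDomInt] using hd
  by_cases hx : 0 ≤ x
  · have hle : x ≤ 25 * 2 ^ 57 := by
      have := hb.2
      norm_num
      omega
    exact bridge_main 57 x hx hle
  · by_cases h1 : x = -1
    · subst h1
      rw [stepsB_fixed (-1) (by decide), pe_nohalve (by decide), if_neg (by decide)]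
    · have hm : PySem.Int.mod x 2 = 0 := by
        rcases hp with h | h
        · omega
        · exact h
      have hfix : stepE x = x := by
        unfold stepE
        rw [if_neg (fun h => by omega : ¬(x ≥ 50 ∧ PySem.Int.mod x 2 = 0)),
          if_neg (fun h => h.2 hm)]
      rw [stepsB_fixed x hfix, pe_nohalve (fun h => by omega),
        if_neg (fun h => h.1 hm)]

-- ===== VERDICT (by name: the statement is the Claim_ definition above) =====
theorem solution_spec : Claim_equal_solution := by
  intro arr hdom hpre
  unfold Spec_solution
  show loopA arr 0 64 = solution_alt arr
  rw [main_lemma 64 arr, alt_eq_fmax]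
  apply fmax_congr
  intro x hx
  unfold Dom_solution at hdom
  exact elem_eq x ((List.all_eq_true.mp hdom) x hx) (hpre x hx)
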